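-- pv_equiv track=rewrite | github.com/nuno887/final_version | split_text/split_text_02.py | _merge_adjacent_star_orgs_in_dict
-- ===== SOURCE A (Python) =====
-- from typing import Dict, List, Any
--
-- def _merge_adjacent_star_orgs_in_dict(segment_dict: Dict[int, Dict[str, str]]) -> Dict[int, Dict[str, str]]:
--     """
--     Merges adjacent entities within a dictionary segment if they both have
--     the label 'ORG_WITH_STAR_LABEL'.
--     """
--     if not segment_dict:
--         return segment_dict
--
--     merged_dict = {}
--     keys = sorted(segment_dict.keys())
--     i = 0
--
--     while i < len(keys):
--         current_key = keys[i]
--         current_entry = segment_dict[current_key]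
--         current_label = current_entry['label']
--
--         # Start a merge operation if the current label is the target
--         if current_label == "ORG_WITH_STAR_LABEL":
--             merged_text = current_entry['text']
--             j = i + 1
--
--             # Look ahead for adjacent keys
--             while j < len(keys):
--                 next_key = keys[j]
--
--                 # Check for adjacency: keys must be consecutive integers
--                 if next_key == current_key + 1:
--                     next_entry = segment_dict[next_key]
--                     next_label = next_entry['label']
--
--                     if next_label == "ORG_WITH_STAR_LABEL":
--                         # MERGE: Append text and update the current_key reference
--                         # Use a space to join the text for readability
--                         merged_text += " " + next_entry['text']
--                         current_key = next_key # Advance the current_key reference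
--                         j += 1 # Move to the next potential entity
--                     else:
--                         break # Stop merging if the next label is different
--                 else:
--                     break # Stop merging if the keys aren't adjacent
--
--             # After merging, store the combined entity at the STARTING position (keys[i])
--             merged_dict[keys[i]] = {
--                 'text': merged_text,
--                 'label': current_label # Label remains ORG_WITH_STAR_LABEL
--             }
--             # Advance the main counter (i) past all merged entities
--             i = j
--
--         else:
--             # If not merging, just copy the entity
--             merged_dict[current_key] = current_entry
--             i += 1
--
--     return merged_dict
-- ===== SOURCE B (Python) =====
-- def _merge_adjacent_star_orgs_in_dict(segment_dict):
--     """Two-pass rewrite: first group the sorted keys into maximal runs of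
--     adjacent ORG_WITH_STAR_LABEL entries (every other entry is its own
--     segment), then emit the merged dict from those segments."""
--     if not segment_dict:
--         return segment_dict
--
--     # Pass 1: build segments.
--     segments = []
--     for key in sorted(segment_dict):
--         entry = segment_dict[key]
--         if entry['label'] == "ORG_WITH_STAR_LABEL":
--             if segments and segments[-1][0] == 'ORG' and segments[-1][2] == key - 1:
--                 seg = segments[-1]
--                 seg[2] = key
--                 seg[3].append(entry['text'])
--             else:
--                 segments.append(['ORG', key, key, [entry['text']]])
--         else:
--             segments.append(['OTHER', key, entry])
--
--     # Pass 2: emit the output dict.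
--     merged = {}
--     for seg in segments:
--         if seg[0] == 'ORG':
--             merged[seg[1]] = {'text': ' '.join(seg[3]), 'label': "ORG_WITH_STAR_LABEL"}
--         else:
--             merged[seg[1]] = seg[2]
--     return merged
-- ===== Notes on version B (the rewrite author's own statement) =====
-- stated objective: alternative
-- what changed: Replaces A's index-based while-loop with a nested look-ahead scan by a two-pass decomposition: one grouping pass over the sorted keys that collects maximal adjacent ORG_WITH_STAR_LABEL runs into segments, then a separate emission pass that builds the output dict from the segments.
import Mathlib
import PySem

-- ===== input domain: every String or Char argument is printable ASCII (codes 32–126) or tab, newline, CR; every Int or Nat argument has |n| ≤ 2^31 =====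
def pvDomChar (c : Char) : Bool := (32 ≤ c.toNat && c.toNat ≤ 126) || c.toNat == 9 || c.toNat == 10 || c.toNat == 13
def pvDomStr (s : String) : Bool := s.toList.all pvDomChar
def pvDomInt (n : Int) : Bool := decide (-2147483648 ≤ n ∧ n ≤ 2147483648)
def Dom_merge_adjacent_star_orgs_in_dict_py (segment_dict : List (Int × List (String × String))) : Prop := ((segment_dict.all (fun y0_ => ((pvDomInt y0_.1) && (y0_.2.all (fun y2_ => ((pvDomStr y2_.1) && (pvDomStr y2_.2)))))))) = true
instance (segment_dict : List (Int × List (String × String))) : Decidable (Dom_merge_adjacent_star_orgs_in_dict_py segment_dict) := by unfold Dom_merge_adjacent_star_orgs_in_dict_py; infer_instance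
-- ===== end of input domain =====

-- ===== PORT A =====
-- B is an alternative two-pass decomposition of A (grouping pass + emission pass); same cost.
-- Shared input decoding: the Python argument is a dict of dicts; PySem.Dict.ofList reproduces
-- Python dict construction from the association list (duplicate keys: last value, first position).
def pvNorm (segment_dict : List (Int × List (String × String))) : PySem.Dict Int (List (String × String)) :=
  PySem.Dict.ofList (segment_dict.map (fun kv => (kv.1, (PySem.Dict.ofList kv.2).items)))

-- entry['label'] / entry['text'] (Pre_ guarantees the key is present; default never read inside Pre_)
def pyLbl (e : List (String × String)) : String := ((PySem.Dict.mk e).get? "label").getD ""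
def pyTxt (e : List (String × String)) : String := ((PySem.Dict.mk e).get? "text").getD ""

-- A's inner while loop: look ahead over the remaining sorted keys, merging adjacent ORG entries
def mergeA_extend (d : PySem.Dict Int (List (String × String))) :
    Int → String → List Int → String × List Int
  | _, txt, [] => (txt, [])
  | cur, txt, n :: rest =>
    if n = cur + 1 then
      if pyLbl ((d.get? n).getD []) = "ORG_WITH_STAR_LABEL" then
        mergeA_extend d n (txt ++ " " ++ pyTxt ((d.get? n).getD [])) rest
      else (txt, n :: rest)
    else (txt, n :: rest)

-- termination helper for the outer loop (the inner loop only consumes keys)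
theorem mergeA_extend_len (d : PySem.Dict Int (List (String × String))) (cur : Int) (txt : String)
    (ks : List Int) : (mergeA_extend d cur txt ks).2.length ≤ ks.length := by
  induction ks generalizing cur txt with
  | nil => simp [mergeA_extend]
  | cons n rest ih =>
    simp only [mergeA_extend]
    split_ifs
    · exact Nat.le_succ_of_le (ih _ _)
    · simp
    · simp

-- A's outer while loop over the sorted key list (i / j indices become the suffix of keys)
def mergeA_loop (d : PySem.Dict Int (List (String × String)))
    (acc : PySem.Dict Int (List (String × String))) (ks : List Int) :
    PySem.Dict Int (List (String × String)) :=
  match ks with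
  | [] => acc
  | k :: rest =>
    let e := (d.get? k).getD []
    if pyLbl e = "ORG_WITH_STAR_LABEL" then
      let r := mergeA_extend d k (pyTxt e) rest
      mergeA_loop d (acc.insert k [("text", r.1), ("label", pyLbl e)]) r.2
    else
      mergeA_loop d (acc.insert k e) rest
termination_by ks.length
decreasing_by
  · exact Nat.lt_succ_of_le (mergeA_extend_len d k (pyTxt e) rest)
  · simp

def merge_adjacent_star_orgs_in_dict_py (segment_dict : List (Int × List (String × String))) : List (Int × List (String × String)) :=
  if segment_dict.isEmpty then segment_dict
  else
    (mergeA_loop (pvNorm segment_dict) ⟨[]⟩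
      (PySem.List.sorted (pvNorm segment_dict).keys (fun x => x) false)).items

-- ===== PORT B =====
-- a segment: Sum.inl (first_key, last_key, texts) = an ORG run; Sum.inr (key, entry) = any other entry
abbrev Seg : Type := (Int × Int × List String) ⊕ (Int × List (String × String))

-- pass 1 step: Python appends at the end of `segments` and mutates segments[-1];
-- the port keeps the segment list reversed (newest first) and reverses it before pass 2.
def mergeB_step (d : PySem.Dict Int (List (String × String))) (segs : List Seg) (k : Int) :
    List Seg :=
  let e := (d.get? k).getD []
  if pyLbl e = "ORG_WITH_STAR_LABEL" then
    match segs with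
    | Sum.inl (f, last, ts) :: rest =>
      if last = k - 1 then Sum.inl (f, k, ts ++ [pyTxt e]) :: rest
      else Sum.inl (k, k, [pyTxt e]) :: Sum.inl (f, last, ts) :: rest
    | _ => Sum.inl (k, k, [pyTxt e]) :: segs
  else
    Sum.inr (k, e) :: segs

-- pass 2 step: emit one segment into the output dict
def mergeB_emit (acc : PySem.Dict Int (List (String × String))) (s : Seg) :
    PySem.Dict Int (List (String × String)) :=
  match s with
  | Sum.inl (f, _, ts) => acc.insert f [("text", PySem.Str.join " " ts), ("label", "ORG_WITH_STAR_LABEL")]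
  | Sum.inr (k, e) => acc.insert k e

def merge_adjacent_star_orgs_in_dict_py_alt (segment_dict : List (Int × List (String × String))) : List (Int × List (String × String)) :=
  if segment_dict.isEmpty then segment_dict
  else
    let d := pvNorm segment_dict
    let keys := PySem.List.sorted d.keys (fun x => x) false
    (((keys.foldl (mergeB_step d) []).reverse).foldl mergeB_emit ⟨[]⟩).items

-- ===== PRECONDITION & SPEC =====
-- Pre_ excludes exactly the inputs on which the Python A raises KeyError: some entry of the
-- dict has no 'label' key, or an entry labelled ORG_WITH_STAR_LABEL has no 'text' key.
def Pre_merge_adjacent_star_orgs_in_dict_py (segment_dict : List (Int × List (String × String))) : Prop :=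
  ∀ kv ∈ (pvNorm segment_dict).items,
    ((PySem.Dict.mk kv.2).get? "label").isSome = true ∧
    ((PySem.Dict.mk kv.2).get? "label" = some "ORG_WITH_STAR_LABEL" →
      ((PySem.Dict.mk kv.2).get? "text").isSome = true)
instance (segment_dict : List (Int × List (String × String))) : Decidable (Pre_merge_adjacent_star_orgs_in_dict_py segment_dict) := by unfold Pre_merge_adjacent_star_orgs_in_dict_py; infer_instance

def pvWitness_merge_adjacent_star_orgs_in_dict_py : (List (Int × List (String × String))) :=
  [(1, [("text", "Direcao"), ("label", "ORG_WITH_STAR_LABEL")]),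
   (2, [("text", "Regional"), ("label", "ORG_WITH_STAR_LABEL")]),
   (4, [("text", "x"), ("label", "PER")])]

def Spec_merge_adjacent_star_orgs_in_dict_py (segment_dict : List (Int × List (String × String))) (out : List (Int × List (String × String))) : Prop := out = merge_adjacent_star_orgs_in_dict_py_alt segment_dict
instance (segment_dict : List (Int × List (String × String))) (out : List (Int × List (String × String))) : Decidable (Spec_merge_adjacent_star_orgs_in_dict_py segment_dict out) := by unfold Spec_merge_adjacent_star_orgs_in_dict_py; infer_instance

-- ===== CLAIM (what is proved, stated in full; the proofs are below) =====
def Claim_equal_merge_adjacent_star_orgs_in_dict_py : Prop := ∀ (segment_dict : List (Int × List (String × String))), Dom_merge_adjacent_star_orgs_in_dict_py segment_dict → Pre_merge_adjacent_star_orgs_in_dict_py segment_dict → Spec_merge_adjacent_star_orgs_in_dict_py segment_dict (merge_adjacent_star_orgs_in_dict_py segment_dict)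

-- ===== LEMMAS AND PROOFS =====

-- canonical description of one maximal run: (run keys, remaining keys)
def runSpan (d : PySem.Dict Int (List (String × String))) : Int → List Int → List Int × List Int
  | _, [] => ([], [])
  | cur, n :: rest =>
    if n = cur + 1 ∧ pyLbl ((d.get? n).getD []) = "ORG_WITH_STAR_LABEL" then
      let p := runSpan d n rest
      (n :: p.1, p.2)
    else ([], n :: rest)

theorem runSpan_sublist (d : PySem.Dict Int (List (String × String))) (cur : Int) (ks : List Int) :
    (runSpan d cur ks).2.Sublist ks := by
  induction ks generalizing cur with
  | nil => simp [runSpan]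
  | cons n rest ih =>
    simp only [runSpan]
    split_ifs
    · exact (ih n).cons n
    · exact List.Sublist.refl _

-- at the head of the remainder the run really stops
theorem runSpan_stop (d : PySem.Dict Int (List (String × String))) (cur : Int) (ks : List Int) :
    ∀ h ∈ (runSpan d cur ks).2.head?,
      ¬(h = (runSpan d cur ks).1.getLastD cur + 1 ∧
        pyLbl ((d.get? h).getD []) = "ORG_WITH_STAR_LABEL") := by
  induction ks generalizing cur with
  | nil => simp [runSpan]
  | cons n rest ih =>
    by_cases hc : n = cur + 1 ∧ pyLbl ((d.get? n).getD []) = "ORG_WITH_STAR_LABEL"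
    · simpa only [runSpan, if_pos hc, List.getLastD_cons] using ih n
    · simp only [runSpan, if_neg hc, List.head?_cons, Option.mem_def, Option.some.injEq]
      rintro h rfl hx
      exact hc ⟨hx.1, hx.2⟩

-- canonical segment list of a sorted key list
def Segs (d : PySem.Dict Int (List (String × String))) (ks : List Int) : List Seg :=
  match ks with
  | [] => []
  | k :: rest =>
    let e := (d.get? k).getD []
    if pyLbl e = "ORG_WITH_STAR_LABEL" then
      let p := runSpan d k rest
      Sum.inl (k, p.1.getLastD k, pyTxt e :: p.1.map (fun n => pyTxt ((d.get? n).getD []))) ::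
        Segs d p.2
    else
      Sum.inr (k, e) :: Segs d rest
termination_by ks.length
decreasing_by
  · exact Nat.lt_succ_of_le (runSpan_sublist d k rest).length_le
  · simp

def segKey (s : Seg) : Int := match s with | Sum.inl (f, _, _) => f | Sum.inr (k, _) => k

def emitPair (s : Seg) : Int × List (String × String) :=
  match s with
  | Sum.inl (f, _, ts) => (f, [("text", PySem.Str.join " " ts), ("label", "ORG_WITH_STAR_LABEL")])
  | Sum.inr (k, e) => (k, e)

theorem segs_keys (d : PySem.Dict Int (List (String × String))) (ks : List Int)
    (h : ks.Pairwise (· < ·)) :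
    (∀ x ∈ (Segs d ks).map segKey, x ∈ ks) ∧ ((Segs d ks).map segKey).Pairwise (· < ·) := by
  revert h
  fun_induction Segs d ks with
  | case1 => simp
  | case2 k rest e hl p ih =>
    intro h
    simp only [show p = runSpan d k rest from rfl] at ih ⊢
    have hsub : ((runSpan d k rest).2).Sublist rest := runSpan_sublist d k rest
    obtain ⟨ihm, ihp⟩ := ih (((List.pairwise_cons.mp h).2).sublist hsub)
    refine ⟨?_, ?_⟩
    · intro x hx
      simp only [List.map_cons, List.mem_cons] at hx
      rcases hx with hx | hx
      · simp [hx, segKey]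
      · exact List.mem_cons_of_mem _ (hsub.mem (ihm x hx))
    · rw [List.map_cons]
      refine List.pairwise_cons.mpr ⟨?_, ihp⟩
      intro y hy
      exact (List.pairwise_cons.mp h).1 y (hsub.mem (ihm y hy))
  | case3 k rest e hl ih =>
    intro h
    obtain ⟨ihm, ihp⟩ := ih (List.pairwise_cons.mp h).2
    refine ⟨?_, ?_⟩
    · intro x hx
      simp only [List.map_cons, List.mem_cons] at hx
      rcases hx with hx | hx
      · simp [hx, segKey]
      · exact List.mem_cons_of_mem _ (ihm x hx)
    · rw [List.map_cons]
      refine List.pairwise_cons.mpr ⟨?_, ihp⟩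
      intro y hy
      exact (List.pairwise_cons.mp h).1 y (ihm y hy)

-- appending to the head of a nonempty join (the one general string fact A's text fold needs)
theorem join_shift (sep : List Char) (l : List (List Char)) (a b : List Char) :
    PySem.Chars.join sep ((a ++ b) :: l) = a ++ PySem.Chars.join sep (b :: l) := by
  cases l with
  | nil => simp [PySem.Chars.join_singleton]
  | cons c l =>
    rw [PySem.Chars.join_cons_cons, PySem.Chars.join_cons_cons]
    simp [List.append_assoc]

-- join " " (t :: ts) as the left fold A performs
theorem join_foldl (ts : List String) (t : String) :
    ts.foldl (fun s x => s ++ " " ++ x) t = PySem.Str.join " " (t :: ts) := by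
  induction ts generalizing t with
  | nil =>
    apply String.toList_inj.mp
    simp [PySem.Str.toList_join, PySem.Chars.join_singleton]
  | cons x xs ih =>
    simp only [List.foldl_cons]
    rw [ih]
    apply String.toList_inj.mp
    simp only [PySem.Str.toList_join, List.map_cons, String.toList_append]
    rw [join_shift, PySem.Chars.join_cons_cons]

theorem mergeA_extend_spec (d : PySem.Dict Int (List (String × String))) (cur : Int) (txt : String)
    (ks : List Int) :
    mergeA_extend d cur txt ks =
      (((runSpan d cur ks).1.map (fun n => pyTxt ((d.get? n).getD []))).foldl
          (fun s x => s ++ " " ++ x) txt,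
        (runSpan d cur ks).2) := by
  induction ks generalizing cur txt with
  | nil => simp [mergeA_extend, runSpan]
  | cons n rest ih =>
    by_cases h1 : n = cur + 1
    · subst h1
      by_cases h2 : pyLbl ((d.get? (cur + 1)).getD []) = "ORG_WITH_STAR_LABEL"
      · simp [mergeA_extend, runSpan, h2, ih]
      · simp [mergeA_extend, runSpan, h2]
    · simp [mergeA_extend, runSpan, h1]

theorem mergeA_loop_spec (d : PySem.Dict Int (List (String × String))) (ks : List Int)
    (acc : PySem.Dict Int (List (String × String)))
    (hs : ks.Pairwise (· < ·)) (hf : ∀ k ∈ ks, acc.get? k = none) :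
    (mergeA_loop d acc ks).items = acc.items ++ (Segs d ks).map emitPair := by
  revert hf; revert hs
  fun_induction mergeA_loop d acc ks with
  | case1 acc =>
    intro _ _
    simp [Segs]
  | case2 acc k rest e hl r ih =>
    intro hs hf
    simp only [show e = (d.get? k).getD [] from rfl] at hl ih ⊢
    simp only [show r = mergeA_extend d k (pyTxt ((d.get? k).getD [])) rest from rfl,
      mergeA_extend_spec] at ih ⊢
    have hck : acc.contains k = false := by
      rw [PySem.Dict.contains_eq_isSome_get?, hf k List.mem_cons_self]
      rfl
    have hsub : ((runSpan d k rest).2).Sublist rest := runSpan_sublist d k rest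
    have hfresh : ∀ k' ∈ (runSpan d k rest).2,
        (acc.insert k [("text",
            ((runSpan d k rest).1.map (fun n => pyTxt ((d.get? n).getD []))).foldl
              (fun s x => s ++ " " ++ x) (pyTxt ((d.get? k).getD []))),
          ("label", pyLbl ((d.get? k).getD []))]).get? k' = none := by
      intro k' hk'
      have hkr : k' ∈ rest := hsub.mem hk'
      have hne : k' ≠ k := by
        have := (List.pairwise_cons.mp hs).1 k' hkr
        omega
      rw [PySem.Dict.get?_insert_of_ne _ _ hne]
      exact hf k' (List.mem_cons_of_mem _ hkr)
    rw [ih (((List.pairwise_cons.mp hs).2).sublist hsub) hfresh,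
      PySem.Dict.items_insert_of_not_contains _ _ hck, Segs]
    simp only [hl, if_true, List.map_cons, emitPair, join_foldl,
      List.append_assoc, List.singleton_append]
  | case3 acc k rest e hl ih =>
    intro hs hf
    simp only [show e = (d.get? k).getD [] from rfl] at hl ih ⊢
    have hck : acc.contains k = false := by
      rw [PySem.Dict.contains_eq_isSome_get?, hf k List.mem_cons_self]
      rfl
    have hfresh : ∀ k' ∈ rest, (acc.insert k ((d.get? k).getD [])).get? k' = none := by
      intro k' hk'
      have hne : k' ≠ k := by
        have := (List.pairwise_cons.mp hs).1 k' hk'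
        omega
      rw [PySem.Dict.get?_insert_of_ne _ _ hne]
      exact hf k' (List.mem_cons_of_mem _ hk')
    rw [ih (List.pairwise_cons.mp hs).2 hfresh,
      PySem.Dict.items_insert_of_not_contains _ _ hck, Segs]
    simp [if_neg hl, emitPair]

-- pass 1, inside a run: the fold extends the head segment exactly along runSpan
theorem mergeB_run (d : PySem.Dict Int (List (String × String))) (ks : List Int) (cur f : Int)
    (ts : List String) (segs : List Seg)
    (hs : ks.Pairwise (· < ·)) (hgt : ∀ n ∈ ks, cur < n) :
    ks.foldl (mergeB_step d) (Sum.inl (f, cur, ts) :: segs) =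
      (runSpan d cur ks).2.foldl (mergeB_step d)
        (Sum.inl (f, (runSpan d cur ks).1.getLastD cur,
          ts ++ (runSpan d cur ks).1.map (fun n => pyTxt ((d.get? n).getD []))) :: segs) := by
  induction ks generalizing cur ts with
  | nil => simp [runSpan]
  | cons n rest ih =>
    by_cases hc : n = cur + 1 ∧ pyLbl ((d.get? n).getD []) = "ORG_WITH_STAR_LABEL"
    · have hstep : mergeB_step d (Sum.inl (f, cur, ts) :: segs) n =
          Sum.inl (f, n, ts ++ [pyTxt ((d.get? n).getD [])]) :: segs := by
        simp only [mergeB_step, if_pos hc.2]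
        rw [if_pos (by omega)]
      rw [List.foldl_cons, hstep,
        ih n (ts ++ [pyTxt ((d.get? n).getD [])]) (List.pairwise_cons.mp hs).2
          (fun m hm => (List.pairwise_cons.mp hs).1 m hm)]
      simp only [runSpan, if_pos hc, List.getLastD_cons, List.map_cons, List.append_assoc,
        List.singleton_append]
    · simp [runSpan, hc]

-- pass 1, whole fold: the reversed segment list is Segs
theorem mergeB_fold_spec (d : PySem.Dict Int (List (String × String))) (ks : List Int)
    (segs : List Seg) (hs : ks.Pairwise (· < ·))
    (hne : ∀ h, ks.head? = some h → ∀ f last ts r, segs = Sum.inl (f, last, ts) :: r →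
      ¬(pyLbl ((d.get? h).getD []) = "ORG_WITH_STAR_LABEL" ∧ last = h - 1)) :
    ks.foldl (mergeB_step d) segs = (Segs d ks).reverse ++ segs := by
  revert hne; revert segs; revert hs
  fun_induction Segs d ks with
  | case1 =>
    intro _ segs _
    simp
  | case2 k rest e hl p ih =>
    intro hs segs hne
    simp only [show e = (d.get? k).getD [] from rfl] at hl ⊢
    simp only [show p = runSpan d k rest from rfl] at ih ⊢
    have hstep : mergeB_step d segs k =
        Sum.inl (k, k, [pyTxt ((d.get? k).getD [])]) :: segs := by
      match segs with
      | [] => simp [mergeB_step, hl]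
      | Sum.inr q :: r => simp [mergeB_step, hl]
      | Sum.inl (f, last, ts) :: r =>
        have hnl : ¬(last = k - 1) := fun hlast =>
          hne k rfl f last ts r rfl ⟨hl, hlast⟩
        simp [mergeB_step, hl, hnl]
    rw [List.foldl_cons, hstep,
      mergeB_run d rest k k [pyTxt ((d.get? k).getD [])] segs
        (List.pairwise_cons.mp hs).2 (List.pairwise_cons.mp hs).1]
    have hsub : ((runSpan d k rest).2).Sublist rest := runSpan_sublist d k rest
    rw [ih (((List.pairwise_cons.mp hs).2).sublist hsub) _
      (by
        intro h hh f last ts r heq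
        simp only [List.cons.injEq, Sum.inl.injEq, Prod.mk.injEq] at heq
        obtain ⟨⟨hkf, hgl, hT⟩, hsr⟩ := heq
        rintro ⟨ha, hb⟩
        exact runSpan_stop d k rest h (Option.mem_def.mpr hh) ⟨by omega, ha⟩)]
    simp [List.reverse_cons, List.append_assoc]
  | case3 k rest e hl ih =>
    intro hs segs hne
    simp only [show e = (d.get? k).getD [] from rfl] at hl ⊢
    have hstep : mergeB_step d segs k = Sum.inr (k, (d.get? k).getD []) :: segs := by
      simp [mergeB_step, hl]
    rw [List.foldl_cons, hstep,
      ih (List.pairwise_cons.mp hs).2 _ (by intro h hh f last ts r heq; simp at heq)]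
    simp [List.reverse_cons, List.append_assoc]

-- pass 2: emitting distinct fresh keys appends the segment pairs
theorem mergeB_emit_spec (segList : List Seg) (acc : PySem.Dict Int (List (String × String)))
    (hf : ∀ s ∈ segList, acc.get? (segKey s) = none)
    (hnd : (segList.map segKey).Nodup) :
    (segList.foldl mergeB_emit acc).items = acc.items ++ segList.map emitPair := by
  induction segList generalizing acc with
  | nil => simp
  | cons s rest ih =>
    have hck : acc.contains (segKey s) = false := by
      rw [PySem.Dict.contains_eq_isSome_get?, hf s List.mem_cons_self]
      rfl
    have hemit : mergeB_emit acc s = acc.insert (segKey s) (emitPair s).2 := by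
      cases s with
      | inl t => obtain ⟨f, last, ts⟩ := t; rfl
      | inr q => rfl
    have hfresh : ∀ s' ∈ rest, (acc.insert (segKey s) (emitPair s).2).get? (segKey s') = none := by
      intro s' hs'
      have hne : segKey s' ≠ segKey s := by
        intro h
        exact (List.pairwise_cons.mp hnd).1 (segKey s') (List.mem_map_of_mem hs') h.symm
      rw [PySem.Dict.get?_insert_of_ne _ _ hne]
      exact hf s' (List.mem_cons_of_mem _ hs')
    have hsp : (segKey s, (emitPair s).2) = emitPair s := by
      cases s with
      | inl t => obtain ⟨f, last, ts⟩ := t; rfl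
      | inr q => rfl
    rw [List.foldl_cons, hemit, ih _ hfresh (List.pairwise_cons.mp hnd).2,
      PySem.Dict.items_insert_of_not_contains _ _ hck]
    simp [hsp, List.append_assoc]

-- ===== VERDICT (by name: the statement is the Claim_ definition above) =====
theorem merge_adjacent_star_orgs_in_dict_py_spec : Claim_equal_merge_adjacent_star_orgs_in_dict_py := by
  intro sd _ _
  unfold Spec_merge_adjacent_star_orgs_in_dict_py
  unfold merge_adjacent_star_orgs_in_dict_py merge_adjacent_star_orgs_in_dict_py_alt
  by_cases hemp : sd.isEmpty
  · simp [hemp]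
  · simp only [hemp, Bool.false_eq_true, if_false]
    set d := pvNorm sd with hd
    set ks := PySem.List.sorted d.keys (fun x => x) false with hks
    have hnd : d.keys.Nodup := PySem.Dict.nodup_keys_ofList _
    have hperm : ks.Perm d.keys := PySem.List.sorted_perm _ _ _
    have hksnd : ks.Nodup := hperm.nodup_iff.mpr hnd
    have hle : ks.Pairwise (fun a b => a ≤ b) := PySem.List.sorted_pairwise _ _
    have hlt : ks.Pairwise (· < ·) :=
      (hle.and hksnd).imp (fun h => lt_of_le_of_ne h.1 h.2)
    have hA := mergeA_loop_spec d ks ⟨[]⟩ hlt (by intro k _; rfl)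
    have hB1 := mergeB_fold_spec d ks [] hlt (by intro h hh f last ts r heq; simp at heq)
    have hsegnd : ((Segs d ks).map segKey).Nodup :=
      ((segs_keys d ks hlt).2).imp (fun h => ne_of_lt h)
    have hB2 := mergeB_emit_spec (Segs d ks) ⟨[]⟩ (by intro s _; rfl) hsegnd
    rw [hA, hB1]
    simp only [List.append_nil, List.reverse_reverse, hB2]
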